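-- pv_equiv track=rewrite | github.com/emiz114/tee-ct-stdorient | orient2video.py | parse_frame_id
-- ===== SOURCE A (Python) =====
-- def parse_frame_id(filename):
--     """
--     Parses a .vtk, .nii.gz, etc. file for av patient frame and id
--     """
--     frame = ""
--     id = ""
--     mode = 0
--     for char in filename:
--         if mode == 0:
--             if char.isdigit():
--                 frame +=char
--             if char == "_":
--                 mode = 1
--         if mode == 1:
--             if char == ".":
--                 break
--             id += char
--     return frame, id
-- ===== SOURCE B (Python) =====
-- def parse_frame_id(filename):
--     head, sep, rest = filename.partition('_')
--     frame = ''.join(c for c in head if c.isdigit())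
--     id = (sep + rest.partition('.')[0]) if sep else ''
--     return frame, id
-- ===== Notes on version B (the rewrite author's own statement) =====
-- stated objective: simpler
-- what changed: Replaced the char-by-char two-mode state machine with str.partition at the first underscore, a digit filter on the head, and a partition at the first dot for the id tail.
import Mathlib
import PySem

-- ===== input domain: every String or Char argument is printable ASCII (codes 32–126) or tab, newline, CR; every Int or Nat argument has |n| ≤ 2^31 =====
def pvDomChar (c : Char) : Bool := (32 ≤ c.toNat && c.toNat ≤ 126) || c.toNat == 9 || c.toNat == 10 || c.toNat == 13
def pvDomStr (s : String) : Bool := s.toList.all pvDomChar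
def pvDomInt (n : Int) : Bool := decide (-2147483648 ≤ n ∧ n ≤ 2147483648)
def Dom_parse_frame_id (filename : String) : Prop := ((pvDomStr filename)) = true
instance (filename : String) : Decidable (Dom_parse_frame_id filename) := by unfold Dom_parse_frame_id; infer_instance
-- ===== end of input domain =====

-- B replaces A's char-by-char two-mode state machine with str.partition at the first underscore, a digit filter, and a partition at the first dot: simpler decomposition, same O(n) cost.

-- ===== PORT A =====
-- A's for-loop with mutable frame, id, mode and break, as structural recursion over the characters.
def parse_frame_id_go : List Char → List Char → List Char → Nat → List Char × List Char
  | [], frame, id, _ => (frame, id)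
  | c :: rest, frame, id, mode =>
    if mode = 0 then
      let frame' := if PySem.Chars.isdigit c then frame ++ [c] else frame
      let mode' := if c = '_' then 1 else mode
      if mode' = 1 then
        if c = '.' then (frame', id)            -- break
        else parse_frame_id_go rest frame' (id ++ [c]) mode'
      else parse_frame_id_go rest frame' id mode'
    else
      if c = '.' then (frame, id)               -- break
      else parse_frame_id_go rest frame (id ++ [c]) mode

def parse_frame_id (filename : String) : String × String :=
  let r := parse_frame_id_go filename.toList [] [] 0
  (String.mk r.1, String.mk r.2)

-- ===== PORT B =====
-- str.partition(sep) for a single-char sep, ported by hand (exact): (before first sep, sep if found else "", after).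
def pvPartitionChar (s : List Char) (sep : Char) : List Char × List Char × List Char :=
  let head := s.takeWhile (fun c => c ≠ sep)
  match s.dropWhile (fun c => c ≠ sep) with
  | [] => (head, [], [])
  | c :: rest => (head, [c], rest)

def parse_frame_id_alt (filename : String) : String × String :=
  let p := pvPartitionChar filename.toList '_'
  let frame := p.1.filter PySem.Chars.isdigit
  let id := if p.2.1 ≠ [] then p.2.1 ++ (pvPartitionChar p.2.2 '.').1 else []
  (String.mk frame, String.mk id)

-- ===== PRECONDITION & SPEC =====
def Spec_parse_frame_id (filename : String) (out : String × String) : Prop := out = parse_frame_id_alt filename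
instance (filename : String) (out : String × String) : Decidable (Spec_parse_frame_id filename out) := by unfold Spec_parse_frame_id; infer_instance

-- ===== CLAIM (what is proved, stated in full; the proofs are below) =====
def Claim_equal_parse_frame_id : Prop := ∀ (filename : String), Dom_parse_frame_id filename → Spec_parse_frame_id filename (parse_frame_id filename)

-- ===== LEMMAS AND PROOFS =====
theorem go_mode1 (l : List Char) : ∀ frame id,
    parse_frame_id_go l frame id 1 = (frame, id ++ l.takeWhile (fun c => c ≠ '.')) := by
  induction l with
  | nil => intro frame id; simp [parse_frame_id_go]
  | cons c rest ih =>
    intro frame id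
    by_cases h : c = '.' <;> simp [parse_frame_id_go, h, ih]

theorem go_mode0 (l : List Char) : ∀ frame id,
    parse_frame_id_go l frame id 0 =
      (frame ++ (l.takeWhile (fun c => c ≠ '_')).filter PySem.Chars.isdigit,
       id ++ match l.dropWhile (fun c => c ≠ '_') with
             | [] => []
             | c :: rest => c :: rest.takeWhile (fun c => c ≠ '.')) := by
  induction l with
  | nil => intro frame id; simp [parse_frame_id_go]
  | cons c rest ih =>
    intro frame id
    by_cases h : c = '_'
    · subst h
      have hd : PySem.Chars.isdigit '_' = false := by decide
      simp [parse_frame_id_go, go_mode1, hd]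
    · by_cases hd : PySem.Chars.isdigit c <;>
        simp [parse_frame_id_go, h, hd, ih]

-- ===== VERDICT (by name: the statement is the Claim_ definition above) =====
theorem parse_frame_id_spec : Claim_equal_parse_frame_id := by
  intro filename _
  unfold Spec_parse_frame_id parse_frame_id parse_frame_id_alt pvPartitionChar
  rw [go_mode0]
  cases h : filename.toList.dropWhile (fun c => c ≠ '_') with
  | nil => simp [h]
  | cons c rest =>
    have hc : c = '_' := by
      have := List.dropWhile_get_zero_not (p := fun c => decide (c ≠ '_')) (l := filename.toList)
      simp_all
    subst hc
    cases hd2 : rest.dropWhile (fun c => !decide (c = '.')) <;> simp [hd2]
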